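-- pv_equiv track=rewrite | github.com/ekaterina0sokolova/python_labs | 1 Стандартная библиотека Python/1_5_functions.py | function
-- ===== SOURCE A (Python) =====
-- def my_pow(num):
--     return num ** 2
--
-- def div_by_seven(num):
--     return True if num % 7 == 0 else False
--
-- def function(n):
--     def_list = [i for i in range(n+1)]
--     list_1 = list(filter(div_by_seven, def_list))
--     list_2 = list(map(my_pow, list_1))
--
--     list_3 = []
--     for i, j in zip(list_1, list_2):
--         list_3.append((i, j))
--
--     return sum(x for tup in list_3 for x in tup)
-- ===== SOURCE B (Python) =====
-- def function(n):
--     if n < 0: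
--         return 0
--     k = n // 7
--     return 7 * (k * (k + 1) // 2) + 49 * (k * (k + 1) * (2 * k + 1) // 6)
-- ===== Notes on version B (the rewrite author's own statement) =====
-- stated objective: faster
-- what changed: Replaced the range/filter/map/zip pipeline with a closed-form formula: with k = n//7 the answer is 7*T(k) + 49*P(k) using the triangular and square-pyramidal sums.
import Mathlib
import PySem

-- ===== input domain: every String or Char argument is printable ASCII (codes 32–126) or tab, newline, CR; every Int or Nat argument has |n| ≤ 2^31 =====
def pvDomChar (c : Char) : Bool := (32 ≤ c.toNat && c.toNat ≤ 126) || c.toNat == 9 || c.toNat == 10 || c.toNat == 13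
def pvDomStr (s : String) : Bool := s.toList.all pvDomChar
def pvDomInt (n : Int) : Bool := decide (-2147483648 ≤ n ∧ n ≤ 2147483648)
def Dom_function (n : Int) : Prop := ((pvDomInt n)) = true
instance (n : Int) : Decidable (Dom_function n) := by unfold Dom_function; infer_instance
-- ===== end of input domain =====

-- B replaces A's O(n) range/filter/map/zip pipeline by the O(1) closed-form sum over k = n//7.


-- ===== PORT A =====
def my_pow (num : Int) : Int := num ^ 2

def div_by_seven (num : Int) : Bool :=
  if PySem.Int.mod num 7 == 0 then true else false

def function (n : Int) : Int :=
  let def_list := PySem.List.pyRange 0 (n + 1) 1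
  let list_1 := def_list.filter div_by_seven
  let list_2 := list_1.map my_pow
  let list_3 := (list_1.zip list_2).foldl (fun acc p => acc ++ [p]) ([] : List (Int × Int))
  list_3.foldl (fun acc p => acc + p.1 + p.2) 0

-- ===== PORT B =====
def function_alt (n : Int) : Int :=
  if n < 0 then 0
  else
    let k := PySem.Int.floordiv n 7
    7 * PySem.Int.floordiv (k * (k + 1)) 2
      + 49 * PySem.Int.floordiv (k * (k + 1) * (2 * k + 1)) 6

-- ===== PRECONDITION & SPEC =====
def Spec_function (n : Int) (out : Int) : Prop := out = function_alt n
instance (n : Int) (out : Int) : Decidable (Spec_function n out) := by unfold Spec_function; infer_instance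

-- ===== CLAIM (what is proved, stated in full; the proofs are below) =====
def Claim_equal_function : Prop := ∀ (n : Int), Dom_function n → Spec_function n (function n)

-- ===== LEMMAS AND PROOFS =====

-- the append-accumulating loop building list_3 is the identity
theorem foldl_append_id {α : Type} (l acc : List α) :
    l.foldl (fun a p => a ++ [p]) acc = acc ++ l := by
  induction l generalizing acc with
  | nil => simp
  | cons x xs ih => simp [List.foldl, ih]

-- summing the flattened zip of l with l.map f
theorem foldl_zip_map (l : List Int) (f : Int → Int) (s : Int) :
    (l.zip (l.map f)).foldl (fun a p => a + p.1 + p.2) s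
      = s + (l.map (fun i => i + f i)).sum := by
  induction l generalizing s with
  | nil => simp
  | cons x xs ih =>
    simp only [List.map, List.zip_cons_cons, List.foldl]
    rw [ih]
    simp [List.sum_cons]
    ring

-- the recursive form of the partial sums Σ_{j=0..k} (7j + 49j²)
def G : Nat → Int
  | 0 => 0
  | k + 1 => G k + 7 * ((k : Int) + 1) + 49 * ((k : Int) + 1) ^ 2

theorem two_dvd_tri (k : Int) : (2 : Int) ∣ k * (k + 1) := (Int.even_mul_succ_self k).two_dvd

theorem six_dvd_pyr (k : Nat) : (6 : Int) ∣ (k : Int) * (k + 1) * (2 * k + 1) := by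
  induction k with
  | zero => simp
  | succ m ih =>
    obtain ⟨t, ht⟩ := ih
    exact ⟨t + (m + 1) ^ 2, by push_cast; push_cast at ht; nlinarith [ht]⟩

-- closed form as computed by the B port
def C (k : Int) : Int :=
  7 * PySem.Int.floordiv (k * (k + 1)) 2
    + 49 * PySem.Int.floordiv (k * (k + 1) * (2 * k + 1)) 6

theorem C_eq_G (k : Nat) : C (k : Int) = G k := by
  induction k with
  | zero => decide
  | succ m ih =>
    have h2 := two_dvd_tri (m : Int)
    have h2' := two_dvd_tri ((m : Int) + 1)
    have h6 := six_dvd_pyr m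
    have h6' := six_dvd_pyr (m + 1)
    obtain ⟨a, ha⟩ := h2
    obtain ⟨a', ha'⟩ := h2'
    obtain ⟨b, hb⟩ := h6
    obtain ⟨b', hb'⟩ := h6'
    push_cast at hb hb' ⊢
    unfold C at ih ⊢
    push_cast at ih
    rw [hb', ha', PySem.Int.floordiv_eq_ediv_of_pos (a := 2 * a') (by norm_num),
      PySem.Int.floordiv_eq_ediv_of_pos (a := 6 * b') (by norm_num),
      Int.mul_ediv_cancel_left _ (by norm_num), Int.mul_ediv_cancel_left _ (by norm_num)]
    rw [hb, ha, PySem.Int.floordiv_eq_ediv_of_pos (a := 2 * a) (by norm_num),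
      PySem.Int.floordiv_eq_ediv_of_pos (a := 6 * b) (by norm_num),
      Int.mul_ediv_cancel_left _ (by norm_num), Int.mul_ediv_cancel_left _ (by norm_num)] at ih
    show (7 : Int) * a' + 49 * b' = G m + 7 * (m + 1) + 49 * ((m : Int) + 1) ^ 2
    have hcancel : (6 : Int) * (7 * a' + 49 * b')
        = 6 * (G m + 7 * (m + 1) + 49 * ((m : Int) + 1) ^ 2) := by
      rw [← ih]; nlinarith [ha, ha', hb, hb']
    exact mul_left_cancel₀ (by norm_num : (6 : Int) ≠ 0) hcancel

-- A's filtered-map sum over range(m) in terms of G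
def S (m : Nat) : Int :=
  (((PySem.List.pyRange 0 (m : Int) 1).filter div_by_seven).map (fun i => i + my_pow i)).sum

theorem S_succ (m : Nat) :
    S (m + 1) = S m + (if (7 : Int) ∣ (m : Int) then (m : Int) + (m : Int) ^ 2 else 0) := by
  unfold S
  have h : ((m : Int) + 1) = (((m + 1 : Nat) : Int)) := by push_cast; ring
  rw [← h, PySem.List.pyRange_one_succ_right (by positivity)]
  by_cases hd : (7 : Int) ∣ (m : Int)
  · have hb : div_by_seven (m : Int) = true := by
      simp [div_by_seven, PySem.Int.mod_eq_zero_iff_dvd, hd]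
    simp [List.filter_append, hb, my_pow, hd]
  · have hb : div_by_seven (m : Int) = false := by
      simp [div_by_seven, PySem.Int.mod_eq_zero_iff_dvd]
      exact hd
    simp [List.filter_append, hb, hd]

theorem S_eq_G (m : Nat) : S (m + 1) = G (m / 7) := by
  induction m with
  | zero => decide
  | succ p ih =>
    by_cases hd : 7 ∣ (p + 1)
    · obtain ⟨q, hq⟩ := hd
      have h1 : (p + 1) / 7 = q := by omega
      have h2 : p / 7 + 1 = q := by omega
      have h7 : (7 : Int) * (((p / 7 : Nat) : Int) + 1) = (p : Int) + 1 := by omega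
      have hG : G ((p + 1) / 7) = G (p / 7) + ((p : Int) + 1) + ((p : Int) + 1) ^ 2 := by
        rw [h1, ← h2]
        simp only [G]
        rw [← h7]
        ring
      have hd2 : (7 : Int) ∣ ((p + 1 : Nat) : Int) := ⟨(q : Int), by omega⟩
      rw [S_succ, ih, if_pos hd2, hG]
      push_cast
      ring
    · have h1 : (p + 1) / 7 = p / 7 := by omega
      have hd2 : ¬ (7 : Int) ∣ ((p + 1 : Nat) : Int) := by
        rw [show ((7 : Int)) = ((7 : Nat) : Int) from rfl, Int.natCast_dvd_natCast]
        exact hd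
      rw [S_succ, ih, if_neg hd2, add_zero, h1]

-- ===== VERDICT (by name: the statement is the Claim_ definition above) =====
theorem function_spec : Claim_equal_function := by
  intro n _
  unfold Spec_function function function_alt
  by_cases hn : n < 0
  · simp only [hn, if_pos]
    rw [PySem.List.pyRange_one_eq_nil (by omega)]
    simp
  · push_neg at hn
    obtain ⟨m, rfl⟩ := Int.eq_ofNat_of_zero_le hn
    simp only
    rw [foldl_append_id, List.nil_append, foldl_zip_map, zero_add]
    have hA := S_eq_G m
    unfold S at hA
    rw [show ((m + 1 : Nat) : Int) = (m : Int) + 1 by push_cast; ring] at hA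
    rw [hA]
    have hfd : PySem.Int.floordiv (m : Int) 7 = ((m / 7 : Nat) : Int) := by
      exact_mod_cast PySem.Int.floordiv_natCast m 7
    rw [if_neg (by omega), hfd]
    exact (C_eq_G (m / 7)).symm
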